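-- pv_equiv track=rewrite | github.com/yangzhoutang/Clothing-Matcher | color_wheel.py | color_locate
-- ===== SOURCE A (Python) =====
-- def color_locate(color_list):
-- 	if len(color_list)==2:
-- 		t=tuple(map(sum, zip(color_list[0], color_list[1])))
-- 		color_ready=tuple(int(ti/2) for ti in t)
-- 	if len(color_list)==3:
-- 		t=tuple(map(sum, zip(color_list[0], color_list[1])))
-- 		t2=tuple(map(sum, zip(t, color_list[2])))
-- 		color_ready=tuple(int(ti/3) for ti in t2)
-- 	if len(color_list)==1:
-- 		color_ready=color_list[0]
-- 	return color_ready
-- ===== SOURCE B (Python) =====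
-- def color_locate(color_list):
--     n = len(color_list)
--     r = g = b = 0
--     for cr, cg, cb in color_list:
--         r += cr
--         g += cg
--         b += cb
--     return (int(r / n), int(g / n), int(b / n))
-- ===== Notes on version B (the rewrite author's own statement) =====
-- stated objective: simpler
-- what changed: Replaces A's length-branching with pairwise zip/map accumulation by a single accumulator loop summing all three channels in one pass and dividing by the length once; Pre_ excludes lengths 0 and >= 4, where A raises UnboundLocalError (B raises ZeroDivisionError on the empty list and returns the average for length >= 4).
import Mathlib
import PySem

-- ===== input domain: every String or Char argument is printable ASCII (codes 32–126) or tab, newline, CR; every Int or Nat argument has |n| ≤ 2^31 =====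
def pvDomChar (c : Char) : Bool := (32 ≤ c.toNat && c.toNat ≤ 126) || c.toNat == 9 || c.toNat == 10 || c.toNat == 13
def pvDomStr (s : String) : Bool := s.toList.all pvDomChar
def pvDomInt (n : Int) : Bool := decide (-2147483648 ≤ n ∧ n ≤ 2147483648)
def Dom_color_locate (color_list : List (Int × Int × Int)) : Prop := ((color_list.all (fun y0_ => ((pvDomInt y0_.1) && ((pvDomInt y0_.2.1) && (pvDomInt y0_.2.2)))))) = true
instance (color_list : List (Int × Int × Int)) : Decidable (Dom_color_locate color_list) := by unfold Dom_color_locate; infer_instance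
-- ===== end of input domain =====

-- B is simpler: one accumulator loop summing the channels, then one division per channel;
-- return value only.
-- ===== PORT A =====
-- Python's int(ti/2) / int(ti/3) truncates the true quotient toward zero (float division is
-- exact enough on Dom-bounded sums): Int.tdiv is exact here.
def color_locate (color_list : List (Int × Int × Int)) : Int × Int × Int :=
  -- color_ready starts unbound (none); each 'if' may assign it; final read = UnboundLocalError
  -- when still none, excluded by Pre_.
  let cr : Option (Int × Int × Int) := none
  let cr :=
    if color_list.length = 2 then
      let c0 := color_list.getD 0 (0, 0, 0)  -- index guarded by the length check: exact
      let c1 := color_list.getD 1 (0, 0, 0)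
      let t := (c0.1 + c1.1, c0.2.1 + c1.2.1, c0.2.2 + c1.2.2)
      some (t.1.tdiv 2, t.2.1.tdiv 2, t.2.2.tdiv 2)
    else cr
  let cr :=
    if color_list.length = 3 then
      let c0 := color_list.getD 0 (0, 0, 0)
      let c1 := color_list.getD 1 (0, 0, 0)
      let c2 := color_list.getD 2 (0, 0, 0)
      let t := (c0.1 + c1.1, c0.2.1 + c1.2.1, c0.2.2 + c1.2.2)
      let t2 := (t.1 + c2.1, t.2.1 + c2.2.1, t.2.2 + c2.2.2)
      some (t2.1.tdiv 3, t2.2.1.tdiv 3, t2.2.2.tdiv 3)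
    else cr
  let cr :=
    if color_list.length = 1 then some (color_list.getD 0 (0, 0, 0)) else cr
  cr.getD (0, 0, 0)

-- ===== PORT B =====
-- int(r / n) truncates toward zero; exact as Int.tdiv on Dom-bounded sums.
def color_locate_alt (color_list : List (Int × Int × Int)) : Int × Int × Int :=
  let n : Int := color_list.length
  let s := color_list.foldl
    (fun (acc : Int × Int × Int) c => (acc.1 + c.1, acc.2.1 + c.2.1, acc.2.2 + c.2.2))
    (0, 0, 0)
  (s.1.tdiv n, s.2.1.tdiv n, s.2.2.tdiv n)

-- ===== PRECONDITION & SPEC =====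
-- Pre_ excludes lengths 0 and >= 4, on which A raises UnboundLocalError (color_ready unbound).
def Pre_color_locate (color_list : List (Int × Int × Int)) : Prop :=
  color_list.length = 1 ∨ color_list.length = 2 ∨ color_list.length = 3
instance (color_list : List (Int × Int × Int)) : Decidable (Pre_color_locate color_list) := by
  unfold Pre_color_locate; infer_instance
def pvWitness_color_locate : (List (Int × Int × Int)) := [(1, 2, 3), (4, 5, 7)]
def Spec_color_locate (color_list : List (Int × Int × Int)) (out : Int × Int × Int) : Prop := out = color_locate_alt color_list
instance (color_list : List (Int × Int × Int)) (out : Int × Int × Int) : Decidable (Spec_color_locate color_list out) := by unfold Spec_color_locate; infer_instance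

-- ===== CLAIM (what is proved, stated in full; the proofs are below) =====
def Claim_equal_color_locate : Prop := ∀ (color_list : List (Int × Int × Int)), Dom_color_locate color_list → Pre_color_locate color_list → Spec_color_locate color_list (color_locate color_list)

-- ===== LEMMAS AND PROOFS =====

-- ===== VERDICT (by name: the statement is the Claim_ definition above) =====
theorem color_locate_spec : Claim_equal_color_locate := by
  intro cl _ hpre
  unfold Spec_color_locate
  rcases cl with _ | ⟨a, _ | ⟨b, _ | ⟨c, _ | ⟨d, tl⟩⟩⟩⟩ <;>
    simp [Pre_color_locate] at hpre <;>
    simp [color_locate, color_locate_alt]
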